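-- pv_equiv track=rewrite | github.com/RescueDiver/arcs4 | reasoning/object_grid_rule.py | cluster_columns
-- ===== SOURCE A (Python) =====
-- def cluster_columns(tiles, threshold=5):
--     if not tiles:
--         return []
--
--     sorted_tiles = sorted(tiles, key=lambda o: o["left"])
--
--     clusters = []
--     current = [sorted_tiles[0]]
--
--     for tile in sorted_tiles[1:]:
--         if abs(tile["left"] - current[-1]["left"]) <= threshold:
--             current.append(tile)
--         else:
--             clusters.append(current)
--             current = [tile]
--
--     clusters.append(current)
--     return clusters
-- ===== SOURCE B (Python) =====
-- def cluster_columns(tiles, threshold=5):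
--     def build(st):
--         # recursion on the sorted list, assembling the answer back-to-front:
--         # cluster the suffix first, then either merge the current tile into the
--         # head cluster of that result or open a new cluster in front of it
--         if not st:
--             return []
--         rest = build(st[1:])
--         if rest and abs(rest[0][0]["left"] - st[0]["left"]) <= threshold:
--             return [[st[0]] + rest[0]] + rest[1:]
--         return [[st[0]]] + rest
--     return build(sorted(tiles, key=lambda o: o["left"]))
-- ===== Notes on version B (the rewrite author's own statement) =====
-- stated objective: alternative
-- what changed: B replaces A's left-to-right accumulate-or-flush loop with a recursion over the sorted list that builds the result back-to-front: it clusters the suffix first, then merges the current tile into the head cluster of that result or opens a new cluster in front.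
import Mathlib
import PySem

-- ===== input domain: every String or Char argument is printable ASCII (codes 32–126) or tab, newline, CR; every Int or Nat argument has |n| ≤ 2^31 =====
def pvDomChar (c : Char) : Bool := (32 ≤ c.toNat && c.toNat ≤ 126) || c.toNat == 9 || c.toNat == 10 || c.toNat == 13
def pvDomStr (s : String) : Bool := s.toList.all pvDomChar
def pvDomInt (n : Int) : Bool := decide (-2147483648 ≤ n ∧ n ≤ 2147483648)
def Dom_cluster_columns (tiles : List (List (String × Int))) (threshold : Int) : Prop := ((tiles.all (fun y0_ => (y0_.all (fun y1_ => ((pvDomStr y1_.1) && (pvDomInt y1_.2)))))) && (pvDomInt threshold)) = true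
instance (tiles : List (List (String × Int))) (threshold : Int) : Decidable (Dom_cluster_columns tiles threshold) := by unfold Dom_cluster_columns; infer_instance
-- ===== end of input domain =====

-- B replaces A's left-to-right accumulate-or-flush loop with a recursion over the sorted
-- list building the result back-to-front (objective: alternative).

-- tile["left"] (total form; exact under Pre_, where the key is present)
def pvLeft (t : List (String × Int)) : Int := ((PySem.Dict.mk t).get? "left").getD 0

-- ===== PORT A =====
def cluster_columns (tiles : List (List (String × Int))) (threshold : Int) : List (List (List (String × Int))) :=
  if tiles = [] then []
  else
    let sorted_tiles := PySem.List.sorted tiles (fun o => pvLeft o) false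
    let r := (PySem.List.slice sorted_tiles (some 1) none).foldl
      (fun (p : List (List (List (String × Int))) × List (List (String × Int))) tile =>
        if |pvLeft tile - pvLeft (PySem.List.pyGetD p.2 (-1) [])| ≤ threshold then
          (p.1, p.2 ++ [tile])
        else
          (p.1 ++ [p.2], [tile]))
      ([], [PySem.List.pyGetD sorted_tiles 0 []])
    r.1 ++ [r.2]

-- ===== PORT B =====
-- build: cluster the suffix first, then merge the current tile into the head cluster
-- of that result or open a new cluster in front (transliteration of Source B's 'build')
def pvBuild (th : Int) : List (List (String × Int)) → List (List (List (String × Int)))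
  | [] => []
  | t :: ts =>
    match pvBuild th ts with
    | [] => [[t]]
    | g :: gs =>
      if |pvLeft (PySem.List.pyGetD g 0 []) - pvLeft t| ≤ th then (t :: g) :: gs
      else [t] :: g :: gs

def cluster_columns_alt (tiles : List (List (String × Int))) (threshold : Int) : List (List (List (String × Int))) :=
  pvBuild threshold (PySem.List.sorted tiles (fun o => pvLeft o) false)

-- ===== PRECONDITION & SPEC =====
-- Pre_ excludes inputs where some tile lacks the "left" key: there A (and B) raise KeyError.
def Pre_cluster_columns (tiles : List (List (String × Int))) (threshold : Int) : Prop :=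
  tiles.all (fun t => ((PySem.Dict.mk t).get? "left").isSome) = true
instance (tiles : List (List (String × Int))) (threshold : Int) : Decidable (Pre_cluster_columns tiles threshold) := by unfold Pre_cluster_columns; infer_instance
def pvWitness_cluster_columns : (List (List (String × Int))) × Int := ([[("left", 3)], [("left", 10)]], 5)

def Spec_cluster_columns (tiles : List (List (String × Int))) (threshold : Int) (out : List (List (List (String × Int)))) : Prop := out = cluster_columns_alt tiles threshold
instance (tiles : List (List (String × Int))) (threshold : Int) (out : List (List (List (String × Int)))) : Decidable (Spec_cluster_columns tiles threshold out) := by unfold Spec_cluster_columns; infer_instance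

-- ===== CLAIM (what is proved, stated in full; the proofs are below) =====
def Claim_equal_cluster_columns : Prop := ∀ (tiles : List (List (String × Int))) (threshold : Int), Dom_cluster_columns tiles threshold → Pre_cluster_columns tiles threshold → Spec_cluster_columns tiles threshold (cluster_columns tiles threshold)

-- ===== LEMMAS AND PROOFS =====

-- reference grouping: scan left to right keeping the previous tile and the open group
def pvGo (th : Int) : List (String × Int) → List (List (String × Int)) → List (List (String × Int)) → List (List (List (String × Int)))
  | _, cur, [] => [cur]
  | last, cur, t :: ts =>
    if |pvLeft t - pvLeft last| ≤ th then pvGo th t (cur ++ [t]) ts else cur :: pvGo th t [t] ts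

lemma pvA_fold (th : Int) :
    ∀ (rest : List (List (String × Int))) (cls : List (List (List (String × Int))))
      (cur : List (List (String × Int))) (last : List (String × Int)),
      cur ≠ [] → cur.getLast? = some last →
      (let r := rest.foldl
        (fun (p : List (List (List (String × Int))) × List (List (String × Int))) tile =>
          if |pvLeft tile - pvLeft (PySem.List.pyGetD p.2 (-1) [])| ≤ th then
            (p.1, p.2 ++ [tile])
          else
            (p.1 ++ [p.2], [tile])) (cls, cur)
       r.1 ++ [r.2]) = cls ++ pvGo th last cur rest := by
  intro rest
  induction rest with
  | nil => intro cls cur last _ _; simp [pvGo]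
  | cons t ts ih =>
    intro cls cur last hne hlast
    have hget : PySem.List.pyGetD cur (-1) ([] : List (String × Int)) = last := by
      rw [PySem.List.pyGetD_neg_one _ _ hne]
      simpa [List.getLast?_eq_some_getLast hne] using hlast
    simp only [List.foldl_cons, hget, pvGo]
    by_cases h : |pvLeft t - pvLeft last| ≤ th
    · simp only [h, if_pos]
      exact ih (cls) (cur ++ [t]) t (by simp) (by simp)
    · simp only [h, if_neg, not_false_iff]
      rw [ih (cls ++ [cur]) [t] t (by simp) (by simp)]
      simp

-- B's back-to-front recursion computes the same grouping as the forward scan pvGo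
lemma pvBuild_go (th : Int) :
    ∀ (ts : List (List (String × Int))) (h : List (String × Int)),
      ∃ g gs, pvBuild th (h :: ts) = (h :: g) :: gs ∧
        ∀ pre, pvGo th h (pre ++ [h]) ts = (pre ++ h :: g) :: gs := by
  intro ts
  induction ts with
  | nil =>
    intro h
    exact ⟨[], [], by simp [pvBuild], by intro pre; simp [pvGo]⟩
  | cons t ts ih =>
    intro h
    obtain ⟨g0, gs0, hb, hgo⟩ := ih t
    by_cases hc : |pvLeft t - pvLeft h| ≤ th
    · refine ⟨t :: g0, gs0, ?_, ?_⟩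
      · rw [pvBuild, hb]; simp [PySem.List.pyGetD_zero_cons, hc]
      · intro pre
        have := hgo (pre ++ [h])
        simp only [pvGo, hc, if_pos]
        simpa using this
    · refine ⟨[], (t :: g0) :: gs0, ?_, ?_⟩
      · rw [pvBuild, hb]; simp [PySem.List.pyGetD_zero_cons, hc]
      · intro pre
        have := hgo []
        simp only [pvGo, hc, if_neg, not_false_iff]
        simp at this
        simp [this]

-- ===== VERDICT (by name: the statement is the Claim_ definition above) =====
theorem cluster_columns_spec : Claim_equal_cluster_columns := by
  intro tiles threshold _ _
  unfold Spec_cluster_columns cluster_columns cluster_columns_alt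
  by_cases hnil : tiles = []
  · subst hnil
    have hs : PySem.List.sorted ([] : List (List (String × Int))) (fun o => pvLeft o) false = [] := by
      simp [PySem.List.sorted_eq_nil_iff]
    simp [hs, pvBuild]
  · simp only [hnil, if_neg, not_false_iff]
    have hst : PySem.List.sorted tiles (fun o => pvLeft o) false ≠ [] := by
      simpa [PySem.List.sorted_eq_nil_iff] using hnil
    obtain ⟨h, rest, hcons⟩ := List.exists_cons_of_ne_nil hst
    rw [hcons]
    have h0 : PySem.List.pyGetD (h :: rest) 0 ([] : List (String × Int)) = h := by
      simp [PySem.List.pyGetD_zero_cons]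
    have h1 : PySem.List.slice (h :: rest) (some 1) none = rest := by
      simp [PySem.List.slice_from_one]
    rw [h0, h1]
    have hA := pvA_fold threshold rest [] [h] h (by simp) (by simp)
    obtain ⟨g, gs, hb, hgo⟩ := pvBuild_go threshold rest h
    have := hgo []
    simp at this hA
    rw [hA, this, hb]
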